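-- pv_equiv track=rewrite | github.com/CayoH10/AtividadePy | Main.py | maior_soma
-- ===== SOURCE A (Python) =====
-- def maior_soma(matriz): #Atividade 9
--     maior = float('-inf')
--     indice = -1
--
--     for i, linha in enumerate(matriz):
--         soma = sum(linha)
--         if soma > maior:
--             maior = soma
--             indice = i
--     return indice
-- ===== SOURCE B (Python) =====
-- def maior_soma(matriz):
--     if not matriz:
--         return -1
--     somas = [sum(linha) for linha in matriz]
--     return somas.index(max(somas))
-- ===== Notes on version B (the rewrite author's own statement) =====
-- stated objective: simpler
-- what changed: Replaced A's single fused loop threading a running best (value, index) pair with two separate passes: build the list of row sums, then return somas.index(max(somas)); an explicit -1 guard covers the empty matrix.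
import Mathlib
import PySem

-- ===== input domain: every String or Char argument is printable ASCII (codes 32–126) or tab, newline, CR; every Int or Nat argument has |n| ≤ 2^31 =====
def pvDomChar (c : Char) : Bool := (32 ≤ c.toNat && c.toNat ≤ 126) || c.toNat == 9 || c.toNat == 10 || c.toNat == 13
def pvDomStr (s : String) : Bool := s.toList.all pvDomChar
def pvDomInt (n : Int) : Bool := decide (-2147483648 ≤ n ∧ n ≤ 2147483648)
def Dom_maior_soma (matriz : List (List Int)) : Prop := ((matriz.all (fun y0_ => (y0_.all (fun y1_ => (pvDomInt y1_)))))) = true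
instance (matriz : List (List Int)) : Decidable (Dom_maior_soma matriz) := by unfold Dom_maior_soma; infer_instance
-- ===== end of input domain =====

-- B replaces A's fused running-best loop by two passes (list of row sums, then index of its maximum); same cost, simpler shape.

-- ===== PORT A =====
-- float('-inf') initial `maior` is modelled as `none` (every int sum compares strictly greater).
def maior_soma (matriz : List (List Int)) : Int :=
  ((PySem.List.enumerate matriz).foldl
    (fun (st : Option Int × Int) (p : Int × List Int) =>
      let soma := p.2.sum
      match st.1 with
      | none => (some soma, p.1)
      | some maior => if maior < soma then (some soma, p.1) else st)
    (none, -1)).2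

-- ===== PORT B =====
-- the `none` branches are unreachable for a nonempty matrix (max/index of a nonempty list succeed)
def maior_soma_alt (matriz : List (List Int)) : Int :=
  match matriz with
  | [] => -1
  | _ :: _ =>
    match PySem.List.max? (matriz.map List.sum) (fun x => x) with
    | none => -1
    | some m =>
      match PySem.List.index? (matriz.map List.sum) m with
      | some k => (k : Int)
      | none => -1

-- ===== PRECONDITION & SPEC =====
def Spec_maior_soma (matriz : List (List Int)) (out : Int) : Prop := out = maior_soma_alt matriz
instance (matriz : List (List Int)) (out : Int) : Decidable (Spec_maior_soma matriz out) := by unfold Spec_maior_soma; infer_instance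

-- ===== CLAIM (what is proved, stated in full; the proofs are below) =====
def Claim_equal_maior_soma : Prop := ∀ (matriz : List (List Int)), Dom_maior_soma matriz → Spec_maior_soma matriz (maior_soma matriz)

-- ===== LEMMAS AND PROOFS =====

-- A's loop after the first row, abstracted over the list of remaining row sums
def pvBestFrom (m i : Int) (s : Int) : List Int → Int
  | [] => i
  | x :: t => if m < x then pvBestFrom x s (s + 1) t else pvBestFrom m i (s + 1) t

lemma foldA_eq_bestFrom (l : List (List Int)) (s m i : Int) :
    ((PySem.List.enumerate l s).foldl
      (fun (st : Option Int × Int) (p : Int × List Int) =>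
        let soma := p.2.sum
        match st.1 with
        | none => (some soma, p.1)
        | some maior => if maior < soma then (some soma, p.1) else st)
      (some m, i)).2 = pvBestFrom m i s (l.map List.sum) := by
  induction l generalizing s m i with
  | nil => simp [PySem.List.enumerate_nil, pvBestFrom]
  | cons r t ih =>
    rw [PySem.List.enumerate_cons]
    simp only [List.foldl_cons, List.map_cons, pvBestFrom]
    by_cases h : m < r.sum <;> simp [h, ih]

lemma bestFrom_eq (t : List Int) : ∀ (m i s : Int),
    pvBestFrom m i s t =
      if t.foldl max m ≤ m then i else s + (t.idxOf (t.foldl max m) : Int) := by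
  induction t with
  | nil => intro m i s; simp [pvBestFrom]
  | cons x t ih =>
    intro m i s
    simp only [pvBestFrom, List.foldl_cons]
    by_cases hmx : m < x
    · rw [max_eq_right hmx.le, if_pos hmx, ih]
      have hx : x ≤ t.foldl max x := (PySem.List.le_foldl_max t x).1
      by_cases hMx : t.foldl max x ≤ x
      · have hM : t.foldl max x = x := le_antisymm hMx hx
        simp [hM, not_le.mpr hmx, List.idxOf_cons_self]
      · have hne : t.foldl max x ≠ x := fun h => hMx (le_of_eq h)
        have : ¬ t.foldl max x ≤ m := fun h => hMx (h.trans hmx.le)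
        simp [this, hMx, List.idxOf_cons_ne _ (by exact fun h => hne h.symm)]
        ring
    · rw [max_eq_left (not_lt.mp hmx), if_neg hmx, ih]
      by_cases hMm : t.foldl max m ≤ m
      · simp [hMm]
      · have hne : t.foldl max m ≠ x := by
          intro h
          exact hMm (h ▸ (not_lt.mp hmx))
        simp [hMm, List.idxOf_cons_ne _ (by exact fun h => hne h.symm)]
        ring

lemma idxOf?_eq_some_idxOf {x : Int} {l : List Int} (h : x ∈ l) :
    List.idxOf? x l = some (l.idxOf x) := by
  induction l with
  | nil => cases h
  | cons a t ih =>
    by_cases hax : a = x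
    · subst hax; simp [List.idxOf?_cons, List.idxOf_cons_self]
    · have hx : x ∈ t := by
        cases h with
        | head => exact absurd rfl hax
        | tail _ h => exact h
      simp [List.idxOf?_cons, hax, beq_iff_eq, ih hx]

-- ===== VERDICT (by name: the statement is the Claim_ definition above) =====
theorem maior_soma_spec : Claim_equal_maior_soma := by
  intro matriz _
  unfold Spec_maior_soma
  match matriz with
  | [] => rfl
  | r :: t =>
    -- A side: first iteration sets the state to (some r.sum, 0), the rest is pvBestFrom
    have hA : maior_soma (r :: t) = pvBestFrom r.sum 0 1 (t.map List.sum) := by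
      unfold maior_soma
      rw [PySem.List.enumerate_cons]
      simp only [List.foldl_cons]
      exact foldA_eq_bestFrom t 1 r.sum 0
    rw [hA, bestFrom_eq]
    -- B side
    set M := (t.map List.sum).foldl max r.sum with hMdef
    have hmax : PySem.List.max? ((r :: t).map List.sum) (fun x => x) = some M := by
      simpa using PySem.List.max?_id_cons (x := r.sum) (t := t.map List.sum)
    have hMmem : M ∈ (r :: t).map List.sum :=
      PySem.List.max?_mem (key := fun x => x) hmax
    show _ = (match PySem.List.max? ((r :: t).map List.sum) (fun x => x) with
      | none => (-1 : Int)
      | some m =>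
        match PySem.List.index? ((r :: t).map List.sum) m with
        | some k => (k : Int)
        | none => -1)
    rw [hmax]
    show _ = (match PySem.List.index? ((r :: t).map List.sum) M with
      | some k => (k : Int)
      | none => (-1 : Int))
    rw [PySem.List.index?_eq_idxOf?, idxOf?_eq_some_idxOf hMmem]
    have hle : r.sum ≤ M := (PySem.List.le_foldl_max (t.map List.sum) r.sum).1
    by_cases hM : M ≤ r.sum
    · have : M = r.sum := le_antisymm hM hle
      simp [List.map_cons, this, List.idxOf_cons_self]
    · have hne : M ≠ r.sum := fun h => hM (le_of_eq h)
      simp [hM, List.map_cons, List.idxOf_cons_ne _ (by exact fun h => hne h.symm)]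
      ring
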